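-- pv_equiv track=rewrite | github.com/kshitij-singh06/intelx | backend/Web-Analyzer/app/services/archives_service.py | count_page_changes
-- ===== SOURCE A (Python) =====
-- from typing import Dict, Any, List
--
-- def count_page_changes(results: List[List[str]]) -> int:
--     """Count the number of times the page content changed based on digest"""
--     prev_digest = None
--     changes = -1
--
--     for result in results:
--         if len(result) >= 3 and result[2] != prev_digest:
--             prev_digest = result[2]
--             changes += 1
--
--     return changes
-- ===== SOURCE B (Python) =====
-- from typing import List
--
-- def _runs(d: List[str], lo: int, hi: int) -> int:
--     """Number of maximal runs of equal adjacent values in d[lo:hi], by divide and conquer: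
--     runs(whole) = runs(left) + runs(right) - (boundary pair equal)."""
--     if hi - lo <= 1:
--         return hi - lo
--     m = (lo + hi) // 2
--     return _runs(d, lo, m) + _runs(d, m, hi) - (d[m - 1] == d[m])
--
-- def count_page_changes(results: List[List[str]]) -> int:
--     digests = [r[2] for r in results if len(r) >= 3]
--     return _runs(digests, 0, len(digests)) - 1
-- ===== Notes on version B (the rewrite author's own statement) =====
-- stated objective: alternative
-- what changed: Replaces A's stateful left-to-right prev_digest scan by a two-stage divide-and-conquer: extract the valid digests, then count maximal runs recursively by halving the index range and merging with one boundary comparison; changes = runs - 1.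
import Mathlib
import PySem

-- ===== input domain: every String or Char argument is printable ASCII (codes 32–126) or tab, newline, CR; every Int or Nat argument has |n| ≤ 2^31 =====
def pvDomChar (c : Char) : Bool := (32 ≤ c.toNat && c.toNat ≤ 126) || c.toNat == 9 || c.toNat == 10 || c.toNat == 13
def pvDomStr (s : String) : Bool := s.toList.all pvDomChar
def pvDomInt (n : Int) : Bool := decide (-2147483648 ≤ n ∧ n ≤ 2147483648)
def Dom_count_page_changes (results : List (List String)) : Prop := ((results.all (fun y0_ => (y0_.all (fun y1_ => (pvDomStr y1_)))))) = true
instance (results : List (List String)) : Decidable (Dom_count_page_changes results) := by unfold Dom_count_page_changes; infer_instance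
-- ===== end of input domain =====

-- B replaces A's stateful prev/changes scan by a divide-and-conquer run counter over the extracted digest list (alternative decomposition; same cost).


-- ===== PORT A =====
-- one loop iteration: state = (prev_digest, changes)
def cpcStep (st : Option String × Int) (result : List String) : Option String × Int :=
  if 3 ≤ result.length ∧ some (result.getD 2 "") ≠ st.1 then
    (some (result.getD 2 ""), st.2 + 1)
  else st

def count_page_changes (results : List (List String)) : Int :=
  (results.foldl cpcStep (none, -1)).2

-- ===== PORT B =====
-- the list comprehension [r[2] for r in results if len(r) >= 3]
def cpcDigest (r : List String) : Option String :=
  if 3 ≤ r.length then some (r.getD 2 "") else none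

-- _runs: maximal runs of equal adjacent values in d[lo:hi] by divide and conquer
-- (indices m-1, m are always in range when reached; getD is exact there)
def cpcRuns (d : List String) (lo hi : Nat) : Int :=
  if h : hi - lo ≤ 1 then ((hi - lo : Nat) : Int)
  else
    cpcRuns d lo ((lo + hi) / 2) + cpcRuns d ((lo + hi) / 2) hi -
      (if d.getD ((lo + hi) / 2 - 1) "" = d.getD ((lo + hi) / 2) "" then 1 else 0)
termination_by hi - lo
decreasing_by
  · omega
  · omega

def count_page_changes_alt (results : List (List String)) : Int :=
  cpcRuns (results.filterMap cpcDigest) 0 (results.filterMap cpcDigest).length - 1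

-- ===== PRECONDITION & SPEC =====
def Spec_count_page_changes (results : List (List String)) (out : Int) : Prop := out = count_page_changes_alt results
instance (results : List (List String)) (out : Int) : Decidable (Spec_count_page_changes results out) := by unfold Spec_count_page_changes; infer_instance

-- ===== CLAIM (what is proved, stated in full; the proofs are below) =====
def Claim_equal_count_page_changes : Prop := ∀ (results : List (List String)), Dom_count_page_changes results → Spec_count_page_changes results (count_page_changes results)

-- ===== LEMMAS AND PROOFS =====

-- number of maximal runs of equal adjacent elements (proof-side reference function)
def cpcGroups : List String → Int
  | [] => 0
  | [_] => 1
  | x :: y :: t => (if x = y then 0 else 1) + cpcGroups (y :: t)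

-- step on a digest (A's loop body once the length test passed)
def cpcStep' (st : Option String × Int) (d : String) : Option String × Int :=
  if some d ≠ st.1 then (some d, st.2 + 1) else st

-- count of changes starting from previous digest p
def cpcRun (p : String) : List String → Int
  | [] => 0
  | x :: t => if x = p then cpcRun p t else 1 + cpcRun x t

-- last digest of the run starting at p
def cpcLast (p : String) : List String → String
  | [] => p
  | x :: t => cpcLast x t

theorem cpc_fold_filter (results : List (List String)) :
    ∀ st, results.foldl cpcStep st = (results.filterMap cpcDigest).foldl cpcStep' st := by
  induction results with
  | nil => intro st; rfl
  | cons r t ih =>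
    intro st
    simp only [List.foldl_cons, List.filterMap_cons]
    by_cases h : 3 ≤ r.length
    · rw [cpcDigest, if_pos h]
      simp only [List.foldl_cons]
      rw [ih]
      congr 1
      simp [cpcStep, cpcStep', h]
    · rw [cpcDigest, if_neg h]
      rw [ih]
      congr 1
      simp [cpcStep, h]

theorem cpc_fold_run (ds : List String) :
    ∀ p c, ds.foldl cpcStep' (some p, c) = (some (cpcLast p ds), c + cpcRun p ds) := by
  induction ds with
  | nil => intro p c; simp [cpcLast, cpcRun]
  | cons x t ih =>
    intro p c
    by_cases h : x = p
    · subst h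
      simp only [List.foldl_cons, cpcStep']
      simp [ih, cpcRun, cpcLast]
    · have hx : some x ≠ some p := by simp [h]
      simp only [List.foldl_cons, cpcStep', if_pos hx]
      rw [ih]
      simp only [cpcRun, cpcLast, if_neg h, Prod.mk.injEq, true_and]
      omega

theorem cpc_groups_run (t : List String) : ∀ d, cpcGroups (d :: t) = 1 + cpcRun d t := by
  induction t with
  | nil => intro d; simp [cpcGroups, cpcRun]
  | cons y s ih =>
    intro d
    by_cases h : d = y
    · subst h
      simp [cpcGroups, cpcRun, ih]
    · simp [cpcGroups, cpcRun, h, Ne.symm h, ih]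

-- A's fold computes cpcGroups of the extracted digests, minus one
theorem cpc_A_groups (results : List (List String)) :
    count_page_changes results = cpcGroups (results.filterMap cpcDigest) - 1 := by
  unfold count_page_changes
  rw [cpc_fold_filter]
  cases h : results.filterMap cpcDigest with
  | nil => rfl
  | cons d t =>
    simp only [List.foldl_cons, cpcStep']
    rw [if_pos (by simp)]
    rw [cpc_fold_run, cpc_groups_run]
    ring

-- merging two adjacent segments costs one boundary comparison
theorem cpc_groups_append (y : String) (ys : List String) :
    ∀ xs, xs ≠ [] → cpcGroups (xs ++ y :: ys) =
      cpcGroups xs + cpcGroups (y :: ys) - (if xs.getLast? = some y then 1 else 0) := by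
  intro xs
  induction xs with
  | nil => intro h; exact absurd rfl h
  | cons x t ih =>
    intro _
    cases t with
    | nil =>
      simp only [List.cons_append, List.nil_append, cpcGroups, List.getLast?_singleton]
      by_cases h : x = y
      · simp [h]
      · simp [h]
    | cons x2 t2 =>
      have ih' := ih (by simp)
      simp only [List.cons_append] at ih' ⊢
      rw [show cpcGroups (x :: x2 :: (t2 ++ y :: ys)) =
            (if x = x2 then 0 else 1) + cpcGroups (x2 :: (t2 ++ y :: ys)) from rfl]
      rw [ih']
      rw [show cpcGroups (x :: x2 :: t2) = (if x = x2 then 0 else 1) + cpcGroups (x2 :: t2) from rfl]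
      rw [show (x :: x2 :: t2).getLast? = (x2 :: t2).getLast? from rfl]
      ring

-- the divide-and-conquer counter equals cpcGroups on the segment
theorem cpcRuns_eq_groups (d : List String) :
    ∀ k lo hi, hi - lo ≤ k → hi ≤ d.length →
      cpcRuns d lo hi = cpcGroups ((d.drop lo).take (hi - lo)) := by
  intro k
  induction k with
  | zero =>
    intro lo hi hk _
    rw [cpcRuns, dif_pos (by omega)]
    have : hi - lo = 0 := by omega
    simp [this, cpcGroups]
  | succ k ih =>
    intro lo hi hk hlen
    by_cases h : hi - lo ≤ 1
    · rw [cpcRuns, dif_pos h]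
      rcases Nat.lt_or_ge (hi - lo) 1 with h0 | h1
      · have : hi - lo = 0 := by omega
        simp [this, cpcGroups]
      · have h1' : hi - lo = 1 := by omega
        have hlo : lo < d.length := by omega
        have hne : d.drop lo ≠ [] := by
          simp [List.drop_eq_nil_iff]; omega
        cases hd : d.drop lo with
        | nil => exact absurd hd hne
        | cons a t => simp [h1', cpcGroups]
    · rw [cpcRuns, dif_neg h]
      generalize hm : (lo + hi) / 2 = m
      have hlom : lo < m := by omega
      have hmhi : m < hi := by omega
      -- split the segment at m
      have hsplit : (d.drop lo).take (hi - lo) =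
          (d.drop lo).take (m - lo) ++ (d.drop m).take (hi - m) := by
        have : hi - lo = (m - lo) + (hi - m) := by omega
        rw [this, List.take_add]
        have h2 : (d.drop lo).drop (m - lo) = d.drop m := by
          rw [List.drop_drop]
          congr 1
          exact Nat.add_sub_cancel' (le_of_lt hlom)
        rw [h2]
      -- the right segment starts with d[m]
      have hmlen : m < d.length := by omega
      have hdropm : d.drop m = d[m] :: d.drop (m + 1) := List.drop_eq_getElem_cons hmlen
      have hRight : (d.drop m).take (hi - m) = d[m] :: (d.drop (m + 1)).take (hi - m - 1) := by
        have h1 : hi - m = (hi - m - 1) + 1 := by omega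
        conv_lhs => rw [h1]
        rw [hdropm, List.take_succ_cons]
      -- left segment facts
      have hLlen : ((d.drop lo).take (m - lo)).length = m - lo := by
        simp [List.length_take, List.length_drop]; omega
      have hLne : (d.drop lo).take (m - lo) ≠ [] := by
        intro hc; rw [hc] at hLlen; simp at hLlen; omega
      have hLlast : ((d.drop lo).take (m - lo)).getLast? = some (d.getD (m - 1) "") := by
        rw [List.getLast?_eq_getElem?, hLlen]
        rw [List.getElem?_take_of_lt (by omega), List.getElem?_drop]
        have hidx : lo + (m - lo - 1) = m - 1 := by omega
        rw [hidx]
        rw [List.getElem?_eq_getElem (by omega)]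
        rw [List.getD_eq_getElem d "" (by omega)]
      have hgd : d.getD m "" = d[m] := List.getD_eq_getElem d "" hmlen
      rw [hsplit, hRight, cpc_groups_append _ _ _ hLne, hLlast]
      rw [ih lo m (by omega) (by omega), ih m hi (by omega) hlen]
      rw [hRight]
      simp only [hgd, Option.some.injEq]

-- ===== VERDICT (by name: the statement is the Claim_ definition above) =====
theorem count_page_changes_spec : Claim_equal_count_page_changes := by
  intro results _
  unfold Spec_count_page_changes count_page_changes_alt
  rw [cpc_A_groups]
  rw [cpcRuns_eq_groups (results.filterMap cpcDigest) (results.filterMap cpcDigest).length 0 _ (by omega) (by omega)]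
  simp
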